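-- pv_equiv track=rewrite | github.com/loopy-dev/algorithm-v2 | programmers/lv2/숫자_카드_나누기.py | solve
-- ===== SOURCE A (Python) =====
-- def get_gcd(a, b):
--     if a < b:
--         a, b = b, a
--
--     if b == 0:
--         return a
--
--     return get_gcd(b, a % b)
--
-- def solve(arr_a, arr_b):
--     gcd = arr_a[0]
--     for i in range(1, len(arr_a)):
--         gcd = get_gcd(gcd, arr_a[i])
--
--     if gcd == 1:
--         return 0
--
--     for i in range(len(arr_b)):
--         if arr_b[i] % gcd == 0:
--             return 0
--
--     return gcd
-- ===== SOURCE B (Python) =====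
-- def solve(arr_a, arr_b):
--     g = arr_a[0]
--     for x in arr_a[1:]:
--         while x:
--             g, x = x, g % x
--     if g == 1:
--         return 0
--     if any(e % g == 0 for e in arr_b):
--         return 0
--     return g
-- ===== Notes on version B (the rewrite author's own statement) =====
-- stated objective: simpler
-- what changed: The recursive swap-based get_gcd helper is replaced by an iterative Euclid while-loop inlined into a fold over arr_a[1:], and the index-based scan of arr_b becomes a single any() over the elements.
-- crash fix: On arr_a with at least two elements containing a negative number, A's get_gcd recursion never terminates (RecursionError), while B's iterative Euclid loop terminates and returns the (possibly negative) folded gcd. — e.g. on solve([-4, -6], []): A raises RecursionError, B returns -2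
import Mathlib
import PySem

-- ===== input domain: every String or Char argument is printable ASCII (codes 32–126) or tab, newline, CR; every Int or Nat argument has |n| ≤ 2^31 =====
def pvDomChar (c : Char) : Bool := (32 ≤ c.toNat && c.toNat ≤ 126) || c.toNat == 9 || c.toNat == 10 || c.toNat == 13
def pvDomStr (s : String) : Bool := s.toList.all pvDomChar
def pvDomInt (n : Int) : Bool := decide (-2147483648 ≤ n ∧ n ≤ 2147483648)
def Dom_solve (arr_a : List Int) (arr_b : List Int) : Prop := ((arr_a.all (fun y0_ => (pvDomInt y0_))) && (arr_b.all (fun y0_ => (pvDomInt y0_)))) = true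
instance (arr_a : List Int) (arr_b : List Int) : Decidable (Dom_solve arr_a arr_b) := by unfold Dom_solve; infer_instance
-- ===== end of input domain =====

-- B replaces the recursive swap-based gcd helper with an iterative Euclid loop folded over
-- arr_a[1:], and the index-based scan of arr_b with a single any() over its elements (simpler).


-- ===== PORT A =====
-- get_gcd can fail to terminate in Python (negative arguments); the fuel parameter only makes
-- the same computation total — inside Pre_ the fuel passed at the call site is always sufficient
-- (lemma get_gcdF_eq_euclid below), and the recursion is fuel-independent there.
def get_gcdF : Nat → Int → Int → Int
  | 0, _, _ => 0
  | fuel+1, a, b =>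
    let a' := if a < b then b else a
    let b' := if a < b then a else b
    if b' = 0 then a' else get_gcdF fuel b' (PySem.Int.mod a' b')

-- the body of A's first for-loop: gcd = get_gcd(gcd, arr_a[i])
def gcdStep (acc x : Int) : Int := get_gcdF (acc.natAbs + x.natAbs + 1) acc x

-- A's second for-loop with its early return, recursing over the index list
def solveLoopB (arr_b : List Int) (g : Int) : List Int → Int
  | [] => g
  | i :: rest =>
    if PySem.Int.mod (PySem.List.pyGetD arr_b i 0) g = 0 then 0
    else solveLoopB arr_b g rest

def solve (arr_a : List Int) (arr_b : List Int) : Int :=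
  let gcd0 := PySem.List.pyGetD arr_a 0 0
  let g := (PySem.List.pyRange 1 (arr_a.length : Int) 1).foldl
    (fun acc i => gcdStep acc (PySem.List.pyGetD arr_a i 0)) gcd0
  if g = 1 then 0
  else solveLoopB arr_b g (PySem.List.pyRange 0 (arr_b.length : Int) 1)

-- ===== PORT B =====
lemma euclid_mod_natAbs_lt (g x : Int) (hx : x ≠ 0) :
    (PySem.Int.mod g x).natAbs < x.natAbs := by
  rcases lt_or_gt_of_ne hx with h | h
  · have := PySem.Int.mod_neg_bounds g h
    omega
  · have h1 := PySem.Int.mod_nonneg g h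
    have h2 := PySem.Int.mod_lt g h
    omega

-- the inner 'while x: g, x = x, g % x'
def euclid (g x : Int) : Int :=
  if _hx : x = 0 then g
  else euclid x (PySem.Int.mod g x)
termination_by x.natAbs
decreasing_by exact euclid_mod_natAbs_lt g x _hx

def solve_alt (arr_a : List Int) (arr_b : List Int) : Int :=
  let g := (PySem.List.slice arr_a (some 1) none).foldl euclid (PySem.List.pyGetD arr_a 0 0)
  if g = 1 then 0
  else if arr_b.any (fun e => PySem.Int.mod e g == 0) then 0
  else g

-- ===== PRECONDITION & SPEC =====
-- Pre_ excludes exactly the inputs where the Python A raises: an empty arr_a (IndexError),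
-- a negative element in a multi-element arr_a (get_gcd never returns: RecursionError),
-- and an all-zero arr_a with a nonempty arr_b (gcd = 0, so arr_b[i] % 0 is a ZeroDivisionError).
def Pre_solve (arr_a : List Int) (arr_b : List Int) : Prop :=
  arr_a ≠ [] ∧ (arr_a.length = 1 ∨ ∀ x ∈ arr_a, 0 ≤ x) ∧ ((∃ x ∈ arr_a, x ≠ 0) ∨ arr_b = [])
instance (arr_a : List Int) (arr_b : List Int) : Decidable (Pre_solve arr_a arr_b) := by
  unfold Pre_solve; infer_instance

def pvWitness_solve : List Int × List Int := ([12, 18, 30], [7, 9])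

-- On arr_a with at least two elements containing a negative number, A's get_gcd recursion never
-- terminates (RecursionError), while B's iterative Euclid loop terminates and returns a value.
def Raises_solve (arr_a : List Int) (arr_b : List Int) : Prop :=
  2 ≤ arr_a.length ∧ ∃ x ∈ arr_a, x < 0
instance (arr_a : List Int) (arr_b : List Int) : Decidable (Raises_solve arr_a arr_b) := by
  unfold Raises_solve; infer_instance
def pvRaiseWitness_solve : List Int × List Int := ([-4, -6], [])
def pvRaiseWitnessOut_solve : Int := -2

def Spec_solve (arr_a : List Int) (arr_b : List Int) (out : Int) : Prop := out = solve_alt arr_a arr_b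
instance (arr_a : List Int) (arr_b : List Int) (out : Int) : Decidable (Spec_solve arr_a arr_b out) := by unfold Spec_solve; infer_instance

-- ===== CLAIM (what is proved, stated in full; the proofs are below) =====
def Claim_equal_solve : Prop := ∀ (arr_a : List Int) (arr_b : List Int), Dom_solve arr_a arr_b → Pre_solve arr_a arr_b → Spec_solve arr_a arr_b (solve arr_a arr_b)
def Claim_raises_solve : Prop := (∀ (arr_a : List Int) (arr_b : List Int), Dom_solve arr_a arr_b → Raises_solve arr_a arr_b → ¬ Pre_solve arr_a arr_b) ∧ (Dom_solve (pvRaiseWitness_solve.1) (pvRaiseWitness_solve.2) ∧ Raises_solve (pvRaiseWitness_solve.1) (pvRaiseWitness_solve.2) ∧ solve_alt (pvRaiseWitness_solve.1) (pvRaiseWitness_solve.2) = pvRaiseWitnessOut_solve)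

-- ===== LEMMAS AND PROOFS =====

lemma pymod_small {a b : Int} (ha : 0 ≤ a) (hab : a < b) : PySem.Int.mod a b = a := by
  rw [PySem.Int.mod_eq_emod_of_pos (lt_of_le_of_lt ha hab)]
  exact Int.emod_eq_of_lt ha hab

lemma euclid_zero (g : Int) : euclid g 0 = g := by rw [euclid]; simp

lemma euclid_nonneg_aux (n : Nat) : ∀ (g x : Int), x.natAbs ≤ n → 0 ≤ g → 0 ≤ x → 0 ≤ euclid g x := by
  induction n with
  | zero =>
    intro g x hn hg _
    have : x = 0 := by omega
    subst this; rw [euclid_zero]; exact hg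
  | succ m ih =>
    intro g x hn hg hx
    by_cases h : x = 0
    · subst h; rw [euclid_zero]; exact hg
    · have hxpos : 0 < x := lt_of_le_of_ne hx (Ne.symm h)
      rw [euclid, dif_neg h]
      exact ih x (PySem.Int.mod g x) (by have := euclid_mod_natAbs_lt g x h; omega) hx
        (PySem.Int.mod_nonneg g hxpos)

lemma euclid_nonneg (g x : Int) (hg : 0 ≤ g) (hx : 0 ≤ x) : 0 ≤ euclid g x :=
  euclid_nonneg_aux x.natAbs g x le_rfl hg hx

-- inside Pre_ (nonnegative arguments) A's fueled recursive gcd IS B's iterative Euclid loop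
lemma get_gcdF_eq_euclid (fuel : Nat) (a b : Int) (ha : 0 ≤ a) (hb : 0 ≤ b)
    (hf : a.natAbs + b.natAbs < fuel) : get_gcdF fuel a b = euclid a b := by
  induction fuel generalizing a b with
  | zero => omega
  | succ f ih =>
    rw [get_gcdF]
    by_cases hab : a < b
    · simp only [if_pos hab]
      have hb0 : b ≠ 0 := by omega
      by_cases ha0 : a = 0
      · subst ha0
        conv_rhs => rw [euclid]
        rw [dif_neg hb0, pymod_small le_rfl hab, euclid_zero]
        simp
      · have hapos : 0 < a := lt_of_le_of_ne ha (Ne.symm ha0)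
        simp only [if_neg ha0]
        have hm : 0 ≤ PySem.Int.mod b a := PySem.Int.mod_nonneg b hapos
        have hmlt : PySem.Int.mod b a < a := PySem.Int.mod_lt b hapos
        rw [ih a (PySem.Int.mod b a) ha hm (by omega)]
        conv_rhs => rw [euclid]
        rw [dif_neg hb0, pymod_small ha hab]
        conv_rhs => rw [euclid]
        rw [dif_neg ha0]
    · simp only [if_neg hab]
      by_cases hb0 : b = 0
      · subst hb0
        simp only [reduceIte]
        exact (euclid_zero a).symm
      · have hbpos : 0 < b := lt_of_le_of_ne hb (Ne.symm hb0)
        simp only [if_neg hb0]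
        have hm : 0 ≤ PySem.Int.mod a b := PySem.Int.mod_nonneg a hbpos
        have hmlt : PySem.Int.mod a b < b := PySem.Int.mod_lt a hbpos
        rw [ih b (PySem.Int.mod a b) hb hm (by omega)]
        conv_rhs => rw [euclid]
        rw [dif_neg hb0]

lemma foldl_gcdStep_eq (l : List Int) (g : Int) (hg : 0 ≤ g) (hl : ∀ x ∈ l, 0 ≤ x) :
    l.foldl gcdStep g = l.foldl euclid g := by
  induction l generalizing g with
  | nil => rfl
  | cons x t ih =>
    have hx : 0 ≤ x := hl x (List.mem_cons_self)
    have hstep : gcdStep g x = euclid g x :=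
      get_gcdF_eq_euclid _ g x hg hx (by omega)
    simp only [List.foldl_cons, hstep]
    exact ih (euclid g x) (euclid_nonneg g x hg hx) (fun y hy => hl y (List.mem_cons_of_mem _ hy))

lemma solveLoopB_eq (arr_b : List Int) (g : Int) :
    ∀ (n k : Nat), arr_b.length - k = n →
    solveLoopB arr_b g (PySem.List.pyRange (k : Int) (arr_b.length : Int) 1) =
      (if (arr_b.drop k).any (fun e => PySem.Int.mod e g == 0) then 0 else g) := by
  intro n
  induction n with
  | zero =>
    intro k hk
    have hle : arr_b.length ≤ k := by omega
    rw [PySem.List.pyRange_one_eq_nil (by exact_mod_cast hle)]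
    rw [List.drop_of_length_le hle]
    simp [solveLoopB]
  | succ m ih =>
    intro k hk
    have hlt : k < arr_b.length := by omega
    rw [PySem.List.pyRange_one_cons (by exact_mod_cast hlt)]
    rw [List.drop_eq_getElem_cons hlt]
    simp only [solveLoopB, PySem.List.pyGetD_natCast, List.getD_eq_getElem _ _ hlt, List.any_cons]
    by_cases hc : PySem.Int.mod arr_b[k] g = 0
    · simp [hc]
    · have : ((k : Int) + 1) = ((k + 1 : Nat) : Int) := by push_cast; ring
      rw [if_neg hc, this, ih (k + 1) (by omega)]
      simp [hc]

lemma solve_alt_raisewit : solve_alt [-4, -6] [] = -2 := by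
  have h1 : PySem.List.slice [(-4 : Int), -6] (some 1) none = [-6] := by decide
  have h2 : PySem.List.pyGetD [(-4 : Int), -6] 0 0 = -4 := by decide
  have m1 : PySem.Int.mod (-4 : Int) (-6) = -4 := by decide
  have m2 : PySem.Int.mod (-6 : Int) (-4) = -2 := by decide
  have m3 : PySem.Int.mod (-4 : Int) (-2) = 0 := by decide
  have he : euclid (-4) (-6) = -2 := by
    rw [euclid, dif_neg (by decide : (-6 : Int) ≠ 0), m1,
        euclid, dif_neg (by decide : (-4 : Int) ≠ 0), m2,
        euclid, dif_neg (by decide : (-2 : Int) ≠ 0), m3,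
        euclid_zero]
  simp [solve_alt, h1, h2, he]

-- ===== VERDICT (by name: the statement is the Claim_ definition above) =====
theorem solve_spec : Claim_equal_solve := by
  intro arr_a arr_b _hdom hpre
  obtain ⟨hne, hpos, _⟩ := hpre
  obtain ⟨a0, rest, rfl⟩ := List.exists_cons_of_ne_nil hne
  unfold Spec_solve
  simp only [solve, solve_alt]
  rw [PySem.List.foldl_pyRange_pyGetD' (a0 :: rest) 0 gcdStep _ (by omega : (0:Int) ≤ 1)]
  rw [PySem.List.slice_from _ (by omega : (0:Int) ≤ 1)]
  have hdrop : List.drop (Int.toNat 1) (a0 :: rest) = rest := by simp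
  rw [hdrop]
  have hfold : rest.foldl gcdStep (PySem.List.pyGetD (a0 :: rest) 0 0) =
      rest.foldl euclid (PySem.List.pyGetD (a0 :: rest) 0 0) := by
    rcases hpos with h1 | h1
    · have : rest = [] := by simpa using h1
      subst this; rfl
    · exact foldl_gcdStep_eq rest _
        (by simpa using h1 a0 List.mem_cons_self)
        (fun x hx => h1 x (List.mem_cons_of_mem _ hx))
  rw [hfold]
  set G := rest.foldl euclid (PySem.List.pyGetD (a0 :: rest) 0 0) with hG
  by_cases h1 : G = 1
  · simp [h1]
  · rw [if_neg h1, if_neg h1]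
    have := solveLoopB_eq arr_b G (arr_b.length) 0 (by omega)
    simpa using this

@[simp] theorem solve_raises : Claim_raises_solve := by
  unfold Claim_raises_solve
  constructor
  · rintro arr_a arr_b _ ⟨hlen, x, hx, hneg⟩ ⟨_, hpos, _⟩
    rcases hpos with h1 | h1
    · omega
    · exact absurd (h1 x hx) (by omega)
  · exact ⟨by decide, by decide, solve_alt_raisewit⟩
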